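-- pv_equiv track=rewrite | github.com/legend048/Compiler-Constrution | 4_simulate_la_for_validating_operator.py | lexical_analyzer
-- ===== SOURCE A (Python) =====
-- def is_operator(token):
--     operators = [
--         '+', '-', '*', '/', '//', '%', '**',
--         '==', '!=', '<', '>', '<=', '>=',
--         '=', '+=', '-=', '*=', '/=', '//=', '%=', '**=',
--         '&=', '|=', '^=', '>>=', '<<=',
--         'and', 'or', 'not',
--         '&', '|', '^', '~', '<<', '>>',
--         'in', 'not in',
--         'is', 'is not',
--         'if', 'else',
--         ':='
--     ]
--     return token in operators
--
-- def lexical_analyzer(input_string):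
--     results = []
--     i = 0
--     operators = [
--         '//=', '**=', '>>=', '<<=', '//', '**', '==', '!=', '<=', '>=',
--         '+=', '-=', '*=', '/=', '%=', '&=', '|=', '^=', '<<', '>>',
--         '+', '-', '*', '/', '%', '=', '<', '>', '&', '|', '^', '~', ':'
--     ]
--     operators.sort(key=len, reverse=True)
--     while i < len(input_string):
--         char = input_string[i]
--         if char.isspace():
--             i += 1
--             continue
--         matched = False
--         for op in operators:
--             if input_string[i:i+len(op)] == op:
--                 results.append(f"'{op}' -> Valid Operator")
--                 i += len(op)
--                 matched = True
--                 break
--         if not matched: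
--             token = ''
--             while i < len(input_string) and (input_string[i].isalnum() or input_string[i] == '_'):
--                 token += input_string[i]
--                 i += 1
--             if token:
--                 if is_operator(token):
--                     results.append(f"'{token}' -> Valid Operator")
--                 else:
--                     results.append(f"'{token}' -> Not an Operator")
--             else:
--                 results.append(f"'{input_string[i]}' -> Not an Operator")
--                 i += 1
--     return results
-- ===== SOURCE B (Python) =====
-- def lexical_analyzer(input_string):
--     # length-indexed operator tables: probe lengths 3,2,1 with a set lookup
--     OPS = {
--         3: {'//=', '**=', '>>=', '<<='},
--         2: {'//', '**', '==', '!=', '<=', '>=', '+=', '-=', '*=', '/=',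
--             '%=', '&=', '|=', '^=', '<<', '>>'},
--         1: {'+', '-', '*', '/', '%', '=', '<', '>', '&', '|', '^', '~', ':'},
--     }
--     # the only entries of is_operator's list a [A-Za-z0-9_]+ token can equal
--     WORD_OPS = {'and', 'or', 'not', 'in', 'is', 'if', 'else'}
--     results = []
--     n = len(input_string)
--     i = 0
--     while i < n:
--         if input_string[i].isspace():
--             i += 1
--             continue
--         match = None
--         for length in (3, 2, 1):
--             cand = input_string[i:i + length]
--             if cand in OPS[length]:
--                 match = cand
--                 break
--         if match is not None:
--             results.append(f"'{match}' -> Valid Operator")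
--             i += len(match)
--             continue
--         j = i
--         while j < n and (input_string[j].isalnum() or input_string[j] == '_'):
--             j += 1
--         if j > i:
--             token = input_string[i:j]
--             kind = "Valid Operator" if token in WORD_OPS else "Not an Operator"
--             results.append(f"'{token}' -> {kind}")
--             i = j
--         else:
--             results.append(f"'{input_string[i]}' -> Not an Operator")
--             i += 1
--     return results
-- ===== Notes on version B (the rewrite author's own statement) =====
-- stated objective: alternative
-- what changed: The inner linear scan over the 33 length-sorted operator strings is replaced by a 3/2/1-length probe with a set lookup per length, the identifier token is sliced out via an end-index scan instead of char-by-char string accumulation, and word operators are classified against a precomputed 7-word set instead of is_operator's 41-entry list scan.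
import Mathlib
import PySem

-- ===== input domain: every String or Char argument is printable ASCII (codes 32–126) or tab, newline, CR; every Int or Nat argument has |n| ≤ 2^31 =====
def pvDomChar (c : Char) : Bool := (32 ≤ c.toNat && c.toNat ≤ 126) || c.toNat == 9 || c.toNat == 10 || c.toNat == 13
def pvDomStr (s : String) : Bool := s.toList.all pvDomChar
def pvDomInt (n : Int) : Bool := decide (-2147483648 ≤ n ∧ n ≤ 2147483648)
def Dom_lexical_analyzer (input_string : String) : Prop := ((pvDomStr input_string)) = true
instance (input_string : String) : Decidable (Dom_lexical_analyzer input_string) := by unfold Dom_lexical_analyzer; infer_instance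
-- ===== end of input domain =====

-- B replaces A's linear scan over the 33 sorted operator strings by a 3/2/1-length
-- probe into per-length sets and slices the identifier token out instead of
-- accumulating it char by char (objective: alternative — a different inner traversal
-- of the same cost).

-- ===== PORT A =====

-- is_operator's list, in source order
def pvIsOpList : List String :=
  ["+", "-", "*", "/", "//", "%", "**",
   "==", "!=", "<", ">", "<=", ">=",
   "=", "+=", "-=", "*=", "/=", "//=", "%=", "**=",
   "&=", "|=", "^=", ">>=", "<<=",
   "and", "or", "not",
   "&", "|", "^", "~", "<<", ">>",
   "in", "not in",
   "is", "is not",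
   "if", "else",
   ":="]

def is_operator (token : String) : Bool := pvIsOpList.contains token

-- lexical_analyzer's local operator list, in source order
def pvOpsA : List String :=
  ["//=", "**=", ">>=", "<<=", "//", "**", "==", "!=", "<=", ">=",
   "+=", "-=", "*=", "/=", "%=", "&=", "|=", "^=", "<<", ">>",
   "+", "-", "*", "/", "%", "=", "<", ">", "&", "|", "^", "~", ":"]

-- operators.sort(key=len, reverse=True)
def pvOpsSortedA : List String := PySem.List.sorted pvOpsA (fun s => PySem.Str.len s) true

-- the for-loop with break: first op whose slice matches
def pvFindA (cs : List Char) (i : Nat) : List String → Option String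
  | [] => none
  | op :: rest =>
      if PySem.List.slice cs (some (i : Int)) (some ((i : Int) + (PySem.Str.len op : Int))) = op.toList
      then some op
      else pvFindA cs i rest

-- the inner token-accumulation while-loop, fuel-guarded (fuel = remaining length): returns (token, new i)
def pvTokenA (cs : List Char) (fuel i : Nat) (token : List Char) : List Char × Nat :=
  match fuel with
  | 0 => (token, i)
  | fuel + 1 =>
    if h : i < cs.length then
      if PySem.Chars.isalnum cs[i] || cs[i] == '_' then
        pvTokenA cs fuel (i + 1) (token ++ [cs[i]])
      else (token, i)
    else (token, i)

-- the outer while-loop, fuel-guarded (each iteration advances i, so length+1 fuel suffices)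
def pvLexA (cs : List Char) (fuel : Nat) (i : Nat) (results : List String) : List String :=
  match fuel with
  | 0 => results
  | fuel + 1 =>
    if h : i < cs.length then
      if PySem.Chars.isspace cs[i] then pvLexA cs fuel (i + 1) results
      else
        match pvFindA cs i pvOpsSortedA with
        | some op =>
            pvLexA cs fuel (i + op.toList.length)
              (results ++ [String.ofList ('\'' :: op.toList ++ "' -> Valid Operator".toList)])
        | none =>
            match pvTokenA cs (cs.length - i) i [] with
            | (token, j) =>
              if token ≠ [] then
                if is_operator (String.ofList token) then
                  pvLexA cs fuel j (results ++ [String.ofList ('\'' :: token ++ "' -> Valid Operator".toList)])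
                else
                  pvLexA cs fuel j (results ++ [String.ofList ('\'' :: token ++ "' -> Not an Operator".toList)])
              else
                pvLexA cs fuel (i + 1) (results ++ [String.ofList ('\'' :: cs[i] :: "' -> Not an Operator".toList)])
    else results

def lexical_analyzer (input_string : String) : List String :=
  pvLexA input_string.toList (input_string.toList.length + 1) 0 []

-- ===== PORT B =====

-- per-length operator sets and the word operators a [A-Za-z0-9_]+ token can equal
def pvOps3 : PySem.Set (List Char) :=
  PySem.Set.ofList ["//=".toList, "**=".toList, ">>=".toList, "<<=".toList]
def pvOps2 : PySem.Set (List Char) :=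
  PySem.Set.ofList ["//".toList, "**".toList, "==".toList, "!=".toList, "<=".toList, ">=".toList,
    "+=".toList, "-=".toList, "*=".toList, "/=".toList, "%=".toList, "&=".toList, "|=".toList,
    "^=".toList, "<<".toList, ">>".toList]
def pvOps1 : PySem.Set (List Char) :=
  PySem.Set.ofList ["+".toList, "-".toList, "*".toList, "/".toList, "%".toList, "=".toList,
    "<".toList, ">".toList, "&".toList, "|".toList, "^".toList, "~".toList, ":".toList]
def pvWordOps : PySem.Set String :=
  PySem.Set.ofList ["and", "or", "not", "in", "is", "if", "else"]

def pvTables : List (Nat × PySem.Set (List Char)) := [(3, pvOps3), (2, pvOps2), (1, pvOps1)]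

-- the for-loop over (length, set) pairs with break
def pvFindB (cs : List Char) (i : Nat) : List (Nat × PySem.Set (List Char)) → Option (List Char)
  | [] => none
  | (len, ops) :: rest =>
      let cand := PySem.List.slice cs (some (i : Int)) (some ((i : Int) + (len : Int)))
      if PySem.Set.contains ops cand then some cand else pvFindB cs i rest

-- the j-scan, fuel-guarded: end index of the identifier token starting at j
def pvScanB (cs : List Char) (fuel j : Nat) : Nat :=
  match fuel with
  | 0 => j
  | fuel + 1 =>
    if h : j < cs.length then
      if PySem.Chars.isalnum cs[j] || cs[j] == '_' then pvScanB cs fuel (j + 1) else j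
    else j

-- the outer while-loop, fuel-guarded like port A's
def pvLexB (cs : List Char) (fuel : Nat) (i : Nat) (results : List String) : List String :=
  match fuel with
  | 0 => results
  | fuel + 1 =>
    if h : i < cs.length then
      if PySem.Chars.isspace cs[i] then pvLexB cs fuel (i + 1) results
      else
        match pvFindB cs i pvTables with
        | some m =>
            pvLexB cs fuel (i + m.length)
              (results ++ [String.ofList ('\'' :: m ++ "' -> Valid Operator".toList)])
        | none =>
            let j := pvScanB cs (cs.length - i) i
            if i < j then
              let token := PySem.List.slice cs (some (i : Int)) (some (j : Int))
              let kind := if PySem.Set.contains pvWordOps (String.ofList token)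
                          then "Valid Operator" else "Not an Operator"
              pvLexB cs fuel j (results ++ [String.ofList ('\'' :: token ++ ("' -> " ++ kind).toList)])
            else
              pvLexB cs fuel (i + 1) (results ++ [String.ofList ('\'' :: cs[i] :: "' -> Not an Operator".toList)])
    else results

def lexical_analyzer_alt (input_string : String) : List String :=
  pvLexB input_string.toList (input_string.toList.length + 1) 0 []

-- ===== PRECONDITION & SPEC =====
def Spec_lexical_analyzer (input_string : String) (out : List String) : Prop := out = lexical_analyzer_alt input_string
instance (input_string : String) (out : List String) : Decidable (Spec_lexical_analyzer input_string out) := by unfold Spec_lexical_analyzer; infer_instance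

-- ===== CLAIM (what is proved, stated in full; the proofs are below) =====
def Claim_equal_lexical_analyzer : Prop := ∀ (input_string : String), Dom_lexical_analyzer input_string → Spec_lexical_analyzer input_string (lexical_analyzer input_string)

-- ===== LEMMAS AND PROOFS =====

def pvTokP (c : Char) : Bool := PySem.Chars.isalnum c || c == '_'

theorem pvTokenA_eq (cs : List Char) (fuel : Nat) :
    ∀ (i : Nat) (acc : List Char), cs.length - i ≤ fuel →
      pvTokenA cs fuel i acc =
        (acc ++ (cs.drop i).takeWhile pvTokP, i + ((cs.drop i).takeWhile pvTokP).length) := by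
  induction fuel with
  | zero =>
      intro i acc hle
      rw [pvTokenA, List.drop_eq_nil_of_le (by omega)]
      simp
  | succ fuel ih =>
      intro i acc hle
      rw [pvTokenA]
      split
      · rename_i h
        rw [List.drop_eq_getElem_cons h, List.takeWhile_cons]
        by_cases hp : pvTokP (cs[i]'h) = true
        · have hp2 : (PySem.Chars.isalnum (cs[i]'h) || cs[i]'h == '_') = true := hp
          rw [if_pos hp2, if_pos hp, ih (i + 1) (acc ++ [cs[i]'h]) (by omega)]
          simp
          omega
        · have hp2 : ¬ (PySem.Chars.isalnum (cs[i]'h) || cs[i]'h == '_') = true := hp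
          rw [if_neg hp2, if_neg hp]
          simp
      · rename_i h
        rw [List.drop_eq_nil_of_le (by omega)]
        simp

theorem pvScanB_eq (cs : List Char) (fuel : Nat) :
    ∀ (i : Nat), cs.length - i ≤ fuel →
      pvScanB cs fuel i = i + ((cs.drop i).takeWhile pvTokP).length := by
  induction fuel with
  | zero =>
      intro i hle
      rw [pvScanB, List.drop_eq_nil_of_le (by omega)]
      simp
  | succ fuel ih =>
      intro i hle
      rw [pvScanB]
      split
      · rename_i h
        rw [List.drop_eq_getElem_cons h, List.takeWhile_cons]
        by_cases hp : pvTokP (cs[i]'h) = true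
        · have hp2 : (PySem.Chars.isalnum (cs[i]'h) || cs[i]'h == '_') = true := hp
          rw [if_pos hp2, if_pos hp, ih (i + 1) (by omega)]
          simp
          omega
        · have hp2 : ¬ (PySem.Chars.isalnum (cs[i]'h) || cs[i]'h == '_') = true := hp
          rw [if_neg hp2, if_neg hp]
          simp
      · rename_i h
        rw [List.drop_eq_nil_of_le (by omega)]
        simp

-- the operator list, grouped by length (pvOpsSortedA = pvG3 ++ pvG2 ++ pvG1)
def pvG3 : List String := ["//=", "**=", ">>=", "<<="]
def pvG2 : List String := ["//", "**", "==", "!=", "<=", ">=",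
   "+=", "-=", "*=", "/=", "%=", "&=", "|=", "^=", "<<", ">>"]
def pvG1 : List String := ["+", "-", "*", "/", "%", "=", "<", ">", "&", "|", "^", "~", ":"]

theorem findA_append (cs : List Char) (i : Nat) (l1 l2 : List String) :
    pvFindA cs i (l1 ++ l2) = (pvFindA cs i l1).or (pvFindA cs i l2) := by
  induction l1 with
  | nil => simp [pvFindA]
  | cons a rest ih =>
      rw [List.cons_append, pvFindA, pvFindA]
      split
      · rfl
      · rw [ih]

theorem groupA (cs : List Char) (i : Nat) (n : Nat) (g : List String)
    (hg : ∀ op ∈ g, op.toList.length = n) :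
    Option.map String.toList (pvFindA cs i g) =
      if (g.map String.toList).contains ((cs.drop i).take n) = true
      then some ((cs.drop i).take n) else none := by
  induction g with
  | nil => simp [pvFindA]
  | cons op rest ih =>
      rw [pvFindA, PySem.Str.len, PySem.List.slice_natCast_add cs i op.toList.length,
        hg op List.mem_cons_self]
      by_cases hc : (cs.drop i).take n = op.toList
      · rw [if_pos hc]
        simp [hc]
      · rw [if_neg hc, ih (fun o ho => hg o (List.mem_cons_of_mem op ho))]
        by_cases hm : (rest.map String.toList).contains ((cs.drop i).take n) = true
        · rw [if_pos hm, if_pos (by simp_all)]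
        · rw [if_neg hm, if_neg (by simp_all)]

theorem pvFind_eq (cs : List Char) (i : Nat) :
    pvFindB cs i pvTables = Option.map String.toList (pvFindA cs i pvOpsSortedA) := by
  have hs : pvOpsSortedA = pvG3 ++ (pvG2 ++ pvG1) := by decide
  rw [hs, findA_append, Option.map_or, findA_append, Option.map_or,
    groupA cs i 3 pvG3 (by decide), groupA cs i 2 pvG2 (by decide), groupA cs i 1 pvG1 (by decide)]
  have m3 : pvG3.map String.toList = pvOps3 := by decide
  have m2 : pvG2.map String.toList = pvOps2 := by decide
  have m1 : pvG1.map String.toList = pvOps1 := by decide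
  rw [m3, m2, m1]
  simp only [pvFindB, pvTables, PySem.Set.contains,
    PySem.List.slice_natCast_add cs i 3, PySem.List.slice_natCast_add cs i 2,
    PySem.List.slice_natCast_add cs i 1]
  by_cases c3 : (cs.drop i).take 3 ∈ (pvOps3 : List (List Char))
  · simp [c3]
  · by_cases c2 : (cs.drop i).take 2 ∈ (pvOps2 : List (List Char))
    · simp [c3, c2]
    · by_cases c1 : (cs.drop i).take 1 ∈ (pvOps1 : List (List Char))
      · simp [c3, c2, c1]
      · simp [c3, c2, c1]

-- on a token all of whose characters are alnum/_, is_operator agrees with the word-operator set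
theorem word_eq (t : List Char) (h : ∀ c ∈ t, pvTokP c = true) :
    is_operator (String.ofList t) = PySem.Set.contains pvWordOps (String.ofList t) := by
  have hsub : ∀ s ∈ (pvWordOps : List String), s ∈ pvIsOpList := by decide
  have hbadB : pvIsOpList.all
      (fun s => List.contains pvWordOps s || s.toList.any (fun c => ! pvTokP c)) = true := by decide
  have hbad : ∀ s ∈ pvIsOpList, s ∉ (pvWordOps : List String) →
      ∃ c ∈ s.toList, ¬ pvTokP c = true := by
    intro s hA hW
    have hs := List.all_eq_true.mp hbadB s hA
    rcases Bool.or_eq_true_iff.mp hs with hc | ha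
    · exact absurd (List.mem_of_elem_eq_true hc) hW
    · obtain ⟨c, hc, hnc⟩ := List.any_eq_true.mp ha
      exact ⟨c, hc, by simpa using hnc⟩
  simp only [is_operator, PySem.Set.contains, List.contains_eq_mem, decide_eq_decide]
  constructor
  · intro hA
    by_contra hW
    obtain ⟨c, hc, hbadc⟩ := hbad _ hA hW
    rw [String.toList_ofList] at hc
    exact hbadc (h c hc)
  · intro hW
    exact hsub _ hW

theorem take_takeWhile (l : List Char) (p : Char → Bool) :
    l.take ((l.takeWhile p).length) = l.takeWhile p := by
  obtain ⟨t, ht⟩ := List.takeWhile_prefix p (l := l)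
  have h2 := List.take_left (l₁ := l.takeWhile p) (l₂ := t)
  rw [ht] at h2
  exact h2

theorem pvLex_eq (cs : List Char) (fuel : Nat) :
    ∀ (i : Nat) (results : List String),
      pvLexA cs fuel i results = pvLexB cs fuel i results := by
  induction fuel with
  | zero => intro i results; rw [pvLexA, pvLexB]
  | succ fuel ih =>
      intro i results
      rw [pvLexA, pvLexB]
      by_cases h : i < cs.length
      · rw [dif_pos h, dif_pos h]
        by_cases hsp : PySem.Chars.isspace (cs[i]'h) = true
        · simp only [hsp, if_true]
          exact ih (i + 1) results
        · simp only [hsp, if_false, Bool.false_eq_true]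
          split
          · rename_i op heq
            have hB : pvFindB cs i pvTables = some op.toList := by
              rw [pvFind_eq, heq]; rfl
            rw [hB]
            exact ih _ _
          · rename_i heq
            have hB : pvFindB cs i pvTables = none := by
              rw [pvFind_eq, heq]; rfl
            rw [hB]
            rw [pvTokenA_eq cs (cs.length - i) i [] le_rfl]
            simp only [List.nil_append]
            split
            · rename_i hne
              split
              · rename_i hop
                rw [pvScanB_eq cs (cs.length - i) i le_rfl, PySem.List.slice_natCast]
                have hcan : i + ((cs.drop i).takeWhile pvTokP).length - i
                    = ((cs.drop i).takeWhile pvTokP).length := by omega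
                rw [hcan, take_takeWhile]
                have hlen : 0 < ((cs.drop i).takeWhile pvTokP).length :=
                  List.length_pos_of_ne_nil hne
                have hw := word_eq ((cs.drop i).takeWhile pvTokP)
                  (fun c hc => List.mem_takeWhile_imp hc)
                rw [if_pos (by omega), ← hw, if_pos hop,
                  show ("' -> " ++ "Valid Operator").toList = "' -> Valid Operator".toList
                    from by decide]
                exact ih _ _
              · rename_i hop
                rw [pvScanB_eq cs (cs.length - i) i le_rfl, PySem.List.slice_natCast]
                have hcan : i + ((cs.drop i).takeWhile pvTokP).length - i
                    = ((cs.drop i).takeWhile pvTokP).length := by omega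
                rw [hcan, take_takeWhile]
                have hlen : 0 < ((cs.drop i).takeWhile pvTokP).length :=
                  List.length_pos_of_ne_nil hne
                have hw := word_eq ((cs.drop i).takeWhile pvTokP)
                  (fun c hc => List.mem_takeWhile_imp hc)
                rw [if_pos (by omega), ← hw, if_neg hop,
                  show ("' -> " ++ "Not an Operator").toList = "' -> Not an Operator".toList
                    from by decide]
                exact ih _ _
            · rename_i hne
              simp only [ne_eq, not_not] at hne
              rw [pvScanB_eq cs (cs.length - i) i le_rfl, if_neg (by simp [hne])]
              exact ih _ _
      · rw [dif_neg h, dif_neg h]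

-- ===== VERDICT (by name: the statement is the Claim_ definition above) =====
theorem lexical_analyzer_spec : Claim_equal_lexical_analyzer := by
  intro s _
  unfold Spec_lexical_analyzer lexical_analyzer lexical_analyzer_alt
  exact pvLex_eq s.toList (s.toList.length + 1) 0 []
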